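-- pv_equiv track=rewrite | github.com/ansible-collections/community.aws | plugins/modules/ec2_transit_gateway_attachment.py | compare_tags
-- ===== SOURCE A (Python) =====
-- def compare_tags(current_tags, desired_tags):
--     tags_to_add = {}
--     tags_to_remove = {}
--
--     for k,v in desired_tags.items():
--         if k not in current_tags.keys():
--             tags_to_add[k] = v
--             continue
--         elif current_tags[k] != v:
--             tags_to_add[k] = v
--             continue
--
--     for k,v in current_tags.items():
--         if k not in desired_tags.keys():
--             tags_to_remove[k] = v
--
--
--     return tags_to_add, tags_to_remove
-- ===== SOURCE B (Python) =====
-- _MISSING = object()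
--
--
-- def compare_tags(current_tags, desired_tags):
--     tags_to_add = {}
--     tags_to_remove = dict(current_tags)
--     for k, v in desired_tags.items():
--         old = tags_to_remove.pop(k, _MISSING)
--         if old is _MISSING or old != v:
--             tags_to_add[k] = v
--     return tags_to_add, tags_to_remove
-- ===== Notes on version B (the rewrite author's own statement) =====
-- stated objective: alternative
-- what changed: Single destructive pass: B copies current_tags as the removal dict and, in one loop over desired_tags, pops each key from that copy (the leftover IS tags_to_remove) while deciding additions from the popped value, instead of A's two loops with membership tests against the other dict.
import Mathlib
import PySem

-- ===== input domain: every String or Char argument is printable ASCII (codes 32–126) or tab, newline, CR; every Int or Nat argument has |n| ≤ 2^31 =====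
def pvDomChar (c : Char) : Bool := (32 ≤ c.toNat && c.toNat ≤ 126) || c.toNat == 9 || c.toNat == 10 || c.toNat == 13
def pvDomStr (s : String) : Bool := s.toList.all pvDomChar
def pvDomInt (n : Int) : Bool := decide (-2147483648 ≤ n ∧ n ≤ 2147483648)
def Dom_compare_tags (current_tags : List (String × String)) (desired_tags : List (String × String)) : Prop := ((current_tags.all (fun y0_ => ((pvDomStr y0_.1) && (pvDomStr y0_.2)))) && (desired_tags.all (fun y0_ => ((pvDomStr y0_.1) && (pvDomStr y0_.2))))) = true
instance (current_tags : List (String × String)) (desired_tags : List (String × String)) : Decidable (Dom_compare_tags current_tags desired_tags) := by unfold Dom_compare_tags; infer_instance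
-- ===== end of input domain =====

-- B is a single destructive pass: it copies current_tags as the removal dict and pops each
-- desired key from it, deciding additions from the popped value; objective: alternative, same cost.

-- ===== PORT A =====
-- the dict arguments arrive as association lists; dict(pairs) semantics via PySem.Dict.ofList
def compare_tags (current_tags : List (String × String)) (desired_tags : List (String × String)) : (List (String × String)) × (List (String × String)) :=
  let current := PySem.Dict.ofList current_tags
  let desired := PySem.Dict.ofList desired_tags
  let tags_to_add :=
    desired.items.foldl (fun (d : PySem.Dict String String) kv =>
      if ¬ current.contains kv.1 then d.insert kv.1 kv.2
      else if current.get? kv.1 ≠ some kv.2 then d.insert kv.1 kv.2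
      else d) PySem.Dict.empty
  let tags_to_remove :=
    current.items.foldl (fun (d : PySem.Dict String String) kv =>
      if ¬ desired.contains kv.1 then d.insert kv.1 kv.2 else d) PySem.Dict.empty
  (tags_to_add.items, tags_to_remove.items)

-- ===== PORT B =====
-- pop(k, _MISSING) = read get? (none = _MISSING) then erase; the loop threads the pair
-- (tags_to_add, tags_to_remove) and the leftover of the copy is tags_to_remove
def compare_tags_alt (current_tags : List (String × String)) (desired_tags : List (String × String)) : (List (String × String)) × (List (String × String)) :=
  let desired := PySem.Dict.ofList desired_tags
  let init : PySem.Dict String String × PySem.Dict String String :=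
    (PySem.Dict.empty, PySem.Dict.ofList current_tags)
  let st :=
    desired.items.foldl (fun (st : PySem.Dict String String × PySem.Dict String String) kv =>
      let old := st.2.get? kv.1
      let rem := st.2.erase kv.1
      if old ≠ some kv.2 then (st.1.insert kv.1 kv.2, rem) else (st.1, rem)) init
  (st.1.items, st.2.items)

-- ===== PRECONDITION & SPEC =====
def Spec_compare_tags (current_tags : List (String × String)) (desired_tags : List (String × String)) (out : (List (String × String)) × (List (String × String))) : Prop := out = compare_tags_alt current_tags desired_tags
instance (current_tags : List (String × String)) (desired_tags : List (String × String)) (out : (List (String × String)) × (List (String × String))) : Decidable (Spec_compare_tags current_tags desired_tags out) := by unfold Spec_compare_tags; infer_instance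

-- ===== CLAIM =====
def Claim_equal_compare_tags : Prop := ∀ (current_tags : List (String × String)) (desired_tags : List (String × String)), Dom_compare_tags current_tags desired_tags → Spec_compare_tags current_tags desired_tags (compare_tags current_tags desired_tags)

-- ===== LEMMAS AND PROOFS =====

-- erasing a different key does not change a lookup
lemma find?_filter_ne {κ ν : Type} [BEq κ] [LawfulBEq κ] (l : List (κ × ν)) (j k : κ)
    (h : k ≠ j) :
    (l.filter (fun p => !(p.1 == j))).find? (fun p => p.1 == k) = l.find? (fun p => p.1 == k) := by
  induction l with
  | nil => rfl
  | cons p l ih =>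
      by_cases hj : p.1 = j
      · have hk : (p.1 == k) = false := by
          simp only [beq_eq_false_iff_ne, hj]; exact fun e => h e.symm
        have hjk : (j == k) = false := by
          simp only [beq_eq_false_iff_ne]; exact fun e => h e.symm
        simp [hj, ih, hjk]
      · by_cases hk : p.1 = k
        · have hj' : (p.1 == j) = false := by
            simp only [beq_eq_false_iff_ne]; exact hj
          have hk' : (p.1 == k) = true := by simp [hk]
          simp [hj', hk']
        · have hj' : (p.1 == j) = false := by
            simp only [beq_eq_false_iff_ne]; exact hj
          have hk' : (p.1 == k) = false := by simp [hk]
          simp [hj', hk', ih]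

lemma get?_erase_of_ne {κ ν : Type} [BEq κ] [LawfulBEq κ] (d : PySem.Dict κ ν) (j k : κ)
    (h : k ≠ j) : (d.erase j).get? k = d.get? k := by
  simp only [PySem.Dict.get?, PySem.Dict.erase]
  rw [find?_filter_ne d.items j k h]

-- the second component of B's loop only ever erases, whatever the branch
lemma snd_foldl_step {κ ν : Type} [BEq κ] [DecidableEq ν] (l : List (κ × ν))
    (a R : PySem.Dict κ ν) :
    (l.foldl (fun (st : PySem.Dict κ ν × PySem.Dict κ ν) kv =>
      if st.2.get? kv.1 ≠ some kv.2 then (st.1.insert kv.1 kv.2, st.2.erase kv.1)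
      else (st.1, st.2.erase kv.1)) (a, R)).2
      = l.foldl (fun r kv => r.erase kv.1) R := by
  induction l generalizing a R with
  | nil => rfl
  | cons kv l ih =>
      simp only [List.foldl_cons]
      by_cases h : R.get? kv.1 = some kv.2
      · rw [if_neg (by simp [h])]; exact ih _ _
      · rw [if_pos h]; exact ih _ _

-- an erase loop is one filter over the items
lemma items_foldl_erase {κ ν : Type} [BEq κ] [LawfulBEq κ] (l : List (κ × ν))
    (R : PySem.Dict κ ν) :
    (l.foldl (fun r kv => r.erase kv.1) R).items
      = R.items.filter (fun kv => !(l.any (fun kv' => kv'.1 == kv.1))) := by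
  induction l generalizing R with
  | nil => simp
  | cons p l ih =>
      rw [List.foldl_cons, ih,
        show (R.erase p.1).items = R.items.filter (fun q => !(q.1 == p.1)) from rfl,
        List.filter_filter]
      apply List.filter_congr
      intro kv _
      by_cases e : kv.1 = p.1
      · simp [e]
      · have h1 : (kv.1 == p.1) = false := by simp [e]
        have h2 : (p.1 == kv.1) = false := by
          simp only [beq_eq_false_iff_ne]; exact fun h => e h.symm
        simp [h1, h2, Bool.and_comm]

-- B's additions, assuming distinct keys and a dict agreeing with C on the keys still to come
lemma fst_foldl_step {κ ν : Type} [BEq κ] [LawfulBEq κ] [DecidableEq ν] (l : List (κ × ν))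
    (C : PySem.Dict κ ν) (a R : PySem.Dict κ ν)
    (hnd : (l.map Prod.fst).Nodup)
    (hag : ∀ kv ∈ l, R.get? kv.1 = C.get? kv.1) :
    (l.foldl (fun (st : PySem.Dict κ ν × PySem.Dict κ ν) kv =>
      if st.2.get? kv.1 ≠ some kv.2 then (st.1.insert kv.1 kv.2, st.2.erase kv.1)
      else (st.1, st.2.erase kv.1)) (a, R)).1
      = l.foldl (fun d kv => if C.get? kv.1 ≠ some kv.2 then d.insert kv.1 kv.2 else d) a := by
  induction l generalizing a R with
  | nil => rfl
  | cons kv l ih =>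
      simp only [List.map_cons, List.nodup_cons] at hnd
      have hhd : R.get? kv.1 = C.get? kv.1 := hag kv (List.mem_cons_self ..)
      have hag' : ∀ kv' ∈ l, (R.erase kv.1).get? kv'.1 = C.get? kv'.1 := by
        intro kv' hm
        have hne : kv'.1 ≠ kv.1 := by
          intro e; exact hnd.1 (e ▸ List.mem_map_of_mem hm)
        rw [get?_erase_of_ne _ _ _ hne]
        exact hag kv' (List.mem_cons_of_mem _ hm)
      simp only [List.foldl_cons, hhd]
      by_cases h : C.get? kv.1 = some kv.2
      · rw [if_neg (by simp [h]), if_neg (by simp [h]), ih _ _ hnd.2 hag']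
      · rw [if_pos h, if_pos h, ih _ _ hnd.2 hag']

-- a conditional-insert loop is an insert loop over the filtered list
lemma foldl_ite_insert {κ ν : Type} [BEq κ] (l : List (κ × ν)) (c : κ × ν → Bool)
    (d : PySem.Dict κ ν) :
    l.foldl (fun d kv => if c kv then d.insert kv.1 kv.2 else d) d
      = (l.filter c).foldl (fun d kv => d.insert kv.1 kv.2) d := by
  induction l generalizing d with
  | nil => rfl
  | cons kv l ih =>
      simp only [List.foldl_cons, List.filter_cons]
      by_cases h : c kv = true
      · simp [h, ih]
      · simp [h, ih]

-- an insert loop from empty over pairs with distinct keys returns exactly those pairs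
lemma items_foldl_insert_of_nodup {κ ν : Type} [BEq κ] [LawfulBEq κ] (l : List (κ × ν))
    (h : (l.map Prod.fst).Nodup) :
    (l.foldl (fun (d : PySem.Dict κ ν) kv => d.insert kv.1 kv.2) PySem.Dict.empty).items = l := by
  have := PySem.Dict.items_foldl_insert_fresh (l := l) (k := Prod.fst) (v := Prod.snd)
    (d := PySem.Dict.empty) (by intro a _; simp [PySem.Dict.contains_empty]) h
  simpa using this

theorem compare_tags_spec : Claim_equal_compare_tags := by
  intro current_tags desired_tags _
  unfold Spec_compare_tags compare_tags compare_tags_alt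
  set current := PySem.Dict.ofList current_tags with hcur
  set desired := PySem.Dict.ofList desired_tags with hdes
  have hndC : current.keys.Nodup := PySem.Dict.nodup_keys_ofList current_tags
  have hndD : desired.keys.Nodup := PySem.Dict.nodup_keys_ofList desired_tags
  simp only [Prod.mk.injEq]
  constructor
  · -- tags_to_add
    rw [fst_foldl_step desired.items current PySem.Dict.empty current hndD (fun _ _ => rfl)]
    have hf : (fun (d : PySem.Dict String String) (kv : String × String) =>
        if ¬ current.contains kv.1 then d.insert kv.1 kv.2
        else if current.get? kv.1 ≠ some kv.2 then d.insert kv.1 kv.2 else d)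
        = (fun (d : PySem.Dict String String) (kv : String × String) =>
            if current.get? kv.1 ≠ some kv.2 then d.insert kv.1 kv.2 else d) := by
      funext d kv
      by_cases h1 : current.contains kv.1 = true
      · by_cases h2 : current.get? kv.1 = some kv.2 <;> simp [h1, h2]
      · have : current.get? kv.1 = none :=
          (PySem.Dict.get?_eq_none_iff_contains current kv.1).mpr (by simpa using h1)
        simp [h1, this]
    rw [hf]
  · -- tags_to_remove
    rw [snd_foldl_step, items_foldl_erase]
    have hb : (fun (d : PySem.Dict String String) (kv : String × String) =>
        if ¬ desired.contains kv.1 then d.insert kv.1 kv.2 else d)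
        = (fun (d : PySem.Dict String String) (kv : String × String) =>
            if (!desired.contains kv.1) then d.insert kv.1 kv.2 else d) := by
      funext d kv
      by_cases h1 : desired.contains kv.1 = true <;> simp [h1]
    rw [hb, foldl_ite_insert, items_foldl_insert_of_nodup]
    · apply List.filter_congr
      intro kv _
      simp [PySem.Dict.contains]
    · exact List.Nodup.sublist (List.Sublist.map Prod.fst
        (List.filter_sublist (p := fun kv : String × String =>
          (!desired.contains kv.1)) (l := current.items))) hndC
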